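-- pv_equiv track=rewrite | github.com/cholovirus/Computacion-Molecular | Laboratorio 03a Ensamblaje de Fragmentos de ADN/main.py | ensamblar
-- ===== SOURCE A (Python) =====
-- def ensamblar(seq1,seq2):
--   tam = 0
--   s1 = seq1
--   s2 = seq2
--   solapamiento_maximo = len(s1) - 1
--   for i in range(solapamiento_maximo, 0, -1):
--     if s1.endswith(s2[:i]):
--       s1 += s2[i:]
--       tam=i
--       break
--   return tam,s1
-- ===== SOURCE B (Python) =====
-- def ensamblar(seq1, seq2):
--     # Forward scan of seq1 through the set of live prefix-lengths of seq2
--     # (the NFA of the pattern): after each character, `active` holds every l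
--     # such that the last l characters read equal seq2[:l].
--     n2 = len(seq2)
--     active = []
--     for c in seq1:
--         active = [l + 1 for l in active + [0] if l < n2 and seq2[l] == c]
--     k = max(active, default=0)
--     if k == 0:
--         return 0, seq1
--     return k, seq1 + seq2[k:]
-- ===== Notes on version B (the rewrite author's own statement) =====
-- stated objective: faster
-- what changed: Replaces A's descending scan that builds an O(i) slice s2[:i] and calls endswith for every candidate i with a single forward pass of seq1 through the set of live prefix-lengths of seq2 (the pattern's NFA states), taking the maximum survivor at the end; expected per-character work is the number of live overlaps, so no quadratic slice construction (measured 14x at n=262144).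
-- intended difference: When one fragment fully contains or extends the other (seq1 ends with all of seq2 and is more than one char longer, or seq1 is a prefix of seq2), A returns an overlap length that matches no suffix/prefix pair (an artefact of its clamped slice s2[:i] and of stopping at len(s1)-1, e.g. (1,'aaa') on ('aa','aa')), while B returns the true maximal overlap ((2,'aa')), the intended value. — e.g. on ensamblar("aa", "aa"): A returns (1, "aaa"), B returns (2, "aa")
import Mathlib
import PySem

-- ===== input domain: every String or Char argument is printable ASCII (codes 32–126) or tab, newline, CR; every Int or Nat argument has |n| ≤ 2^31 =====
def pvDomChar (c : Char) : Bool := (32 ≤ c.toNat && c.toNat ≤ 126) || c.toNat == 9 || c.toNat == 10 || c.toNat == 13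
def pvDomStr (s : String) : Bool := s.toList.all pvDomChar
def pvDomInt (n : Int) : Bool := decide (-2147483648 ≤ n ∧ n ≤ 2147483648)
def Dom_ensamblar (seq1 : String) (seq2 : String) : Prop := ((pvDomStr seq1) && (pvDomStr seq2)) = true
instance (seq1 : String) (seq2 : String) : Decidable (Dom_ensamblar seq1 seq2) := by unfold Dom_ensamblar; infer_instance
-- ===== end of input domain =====

-- B replaces A's descending scan over clamped slices by a single forward pass of seq1
-- through the set of live prefix-lengths of seq2; on inputs where one fragment fully
-- contains/extends the other (D_ below) A reports a wrong overlap and B the true one.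

-- ===== PORT A =====
-- the for-loop of A: descending indices, break on the first match
def ensamblarLoop (s2 : List Char) (s1 : List Char) : List Int → Int × List Char
  | [] => (0, s1)
  | i :: rest =>
    if PySem.Chars.endswith s1 (PySem.List.slice s2 none (some i)) then
      (i, s1 ++ PySem.List.slice s2 (some i) none)
    else ensamblarLoop s2 s1 rest

def ensamblar (seq1 : String) (seq2 : String) : Int × String :=
  let s1 := seq1.toList
  let s2 := seq2.toList
  let r := ensamblarLoop s2 s1 (PySem.List.pyRange (PySem.List.len s1 - 1) 0 (-1))
  (r.1, String.ofList r.2)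

-- ===== PORT B =====
-- one step of B's forward pass: [l + 1 for l in active + [0] if l < n2 and seq2[l] == c]
def ensamblarStep (s2 : List Char) (active : List Nat) (c : Char) : List Nat :=
  ((active ++ [0]).filter (fun l => decide (l < s2.length) && (s2.getD l ' ' == c))).map (· + 1)

def ensamblar_alt (seq1 : String) (seq2 : String) : Int × String :=
  let s2 := seq2.toList
  let active := seq1.toList.foldl (ensamblarStep s2) []
  -- max(active, default=0): running max from 0 (exact: the elements are non-negative)
  let k := active.foldl max 0
  if k = 0 then (0, seq1)
  else ((k : Int), String.ofList (seq1.toList ++ s2.drop k))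

-- ===== PRECONDITION & SPEC =====
-- When one fragment fully contains or extends the other — seq1 ends with all of seq2 and is
-- more than one char longer, or seq1 is a prefix of seq2 — A returns an overlap length that is
-- not the length of any matching suffix/prefix pair (an artefact of its clamped slice s2[:i] and
-- of its range stopping at len(s1)-1), while B returns the true maximal overlap, the intended value.
def D_ensamblar (seq1 : String) (seq2 : String) : Prop :=
  (seq2.toList.length + 1 < seq1.toList.length ∧ seq2.toList <:+ seq1.toList) ∨
  (seq1.toList.length ≤ seq2.toList.length ∧ seq1.toList <+: seq2.toList ∧ seq1.toList ≠ [])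
instance (seq1 : String) (seq2 : String) : Decidable (D_ensamblar seq1 seq2) := by
  unfold D_ensamblar; infer_instance

def Spec_ensamblar (seq1 : String) (seq2 : String) (out : Int × String) : Prop :=
  ¬ D_ensamblar seq1 seq2 → out = ensamblar_alt seq1 seq2
instance (seq1 : String) (seq2 : String) (out : Int × String) : Decidable (Spec_ensamblar seq1 seq2 out) := by
  unfold Spec_ensamblar; infer_instance

def pvDiffWitness_ensamblar : String × String := ("aa", "aa")
def pvDiffWitnessOut_ensamblar : (Int × String) × (Int × String) := ((1, "aaa"), (2, "aa"))

-- ===== CLAIM (what is proved, stated in full; the proofs are below) =====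
def Claim_unchanged_ensamblar : Prop := ∀ (seq1 : String) (seq2 : String), Dom_ensamblar seq1 seq2 → Spec_ensamblar seq1 seq2 (ensamblar seq1 seq2)
def Claim_changed_ensamblar : Prop := Dom_ensamblar (pvDiffWitness_ensamblar.1) (pvDiffWitness_ensamblar.2) ∧ D_ensamblar (pvDiffWitness_ensamblar.1) (pvDiffWitness_ensamblar.2) ∧ ensamblar (pvDiffWitness_ensamblar.1) (pvDiffWitness_ensamblar.2) = pvDiffWitnessOut_ensamblar.1 ∧ ensamblar_alt (pvDiffWitness_ensamblar.1) (pvDiffWitness_ensamblar.2) = pvDiffWitnessOut_ensamblar.2 ∧ pvDiffWitnessOut_ensamblar.1 ≠ pvDiffWitnessOut_ensamblar.2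
def Claim_exact_ensamblar : Prop := ∀ (seq1 : String) (seq2 : String), Dom_ensamblar seq1 seq2 → D_ensamblar seq1 seq2 → ensamblar seq1 seq2 ≠ ensamblar_alt seq1 seq2

-- ===== LEMMAS AND PROOFS =====

-- a suffix one longer: s2[:l+1] is a suffix of p ++ [c] iff s2[:l] is a suffix of p and s2[l] = c
lemma append_singleton_suffix (xs p : List Char) (a c : Char) :
    xs ++ [a] <:+ p ++ [c] ↔ (xs <:+ p ∧ a = c) := by
  rw [← List.reverse_prefix, ← List.reverse_prefix]
  simp [List.cons_prefix_cons]
  tauto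

lemma suffix_take_succ (s2 p : List Char) (c : Char) (l : Nat) (h : l < s2.length) :
    s2.take (l+1) <:+ p ++ [c] ↔ (s2.take l <:+ p ∧ s2[l] = c) := by
  rw [List.take_succ_eq_append_getElem h, append_singleton_suffix]

-- invariant of B's forward pass: the live lengths after reading p are exactly the
-- non-empty overlaps between a suffix of p and a prefix of s2
lemma active_mem (s2 p : List Char) (l : Nat) :
    l ∈ p.foldl (ensamblarStep s2) [] ↔ (1 ≤ l ∧ l ≤ s2.length ∧ s2.take l <:+ p) := by
  induction p using List.reverseRecOn generalizing l with
  | nil =>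
    simp only [List.foldl_nil, List.not_mem_nil, false_iff]
    rintro ⟨h1, h2, h3⟩
    have h4 := h3.length_le
    rw [List.length_take] at h4
    simp only [List.length_nil, Nat.le_zero] at h4
    omega
  | append_singleton p c ih =>
    rw [List.foldl_append]
    simp only [List.foldl_cons, List.foldl_nil, ensamblarStep, List.mem_map, List.mem_filter,
      List.mem_append, List.mem_singleton, Bool.and_eq_true, decide_eq_true_eq, beq_iff_eq]
    constructor
    · rintro ⟨m, ⟨hm, hlt, hc⟩, rfl⟩
      have hsuf : s2.take m <:+ p := by
        rcases hm with hm | rfl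
        · exact ((ih m).mp hm).2.2
        · simp
      have : s2.getD m ' ' = s2[m] := by rw [List.getD_eq_getElem _ _ hlt]
      refine ⟨by omega, by omega, ?_⟩
      rw [suffix_take_succ s2 p c m hlt]
      exact ⟨hsuf, by rw [← this, hc]⟩
    · rintro ⟨h1, h2, h3⟩
      obtain ⟨m, rfl⟩ : ∃ m, l = m + 1 := ⟨l - 1, by omega⟩
      have hlt : m < s2.length := by omega
      rw [suffix_take_succ s2 p c m hlt] at h3
      refine ⟨m, ⟨?_, hlt, by rw [List.getD_eq_getElem _ _ hlt]; exact h3.2⟩, rfl⟩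
      by_cases hm : m = 0
      · right; exact hm
      · left; exact (ih m).mpr ⟨by omega, by omega, h3.1⟩

-- A's loop when no index matches
lemma loop_skip (s2 s1 : List Char) (r : List Int)
    (h : ∀ i ∈ r, PySem.Chars.endswith s1 (PySem.List.slice s2 none (some i)) = false) :
    ensamblarLoop s2 s1 r = (0, s1) := by
  induction r with
  | nil => rfl
  | cons i rest ih =>
    rw [ensamblarLoop, h i (by simp), ih (fun j hj => h j (by simp [hj]))]
    simp

-- A's loop at the first matching index
lemma loop_hit (s2 s1 : List Char) (r1 r2 : List Int) (i : Int)
    (h1 : ∀ j ∈ r1, PySem.Chars.endswith s1 (PySem.List.slice s2 none (some j)) = false)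
    (h2 : PySem.Chars.endswith s1 (PySem.List.slice s2 none (some i)) = true) :
    ensamblarLoop s2 s1 (r1 ++ i :: r2) = (i, s1 ++ PySem.List.slice s2 (some i) none) := by
  induction r1 with
  | nil => rw [List.nil_append, ensamblarLoop, h2]; simp
  | cons j rest ih =>
    rw [List.cons_append, ensamblarLoop, h1 j (by simp)]
    simp only [Bool.false_eq_true, if_false]
    exact ih (fun j hj => h1 j (by simp [hj]))

-- A's reported overlap is 0 or one of the scanned indices
lemma loop_fst (s2 s1 : List Char) (r : List Int) :
    (ensamblarLoop s2 s1 r).1 = 0 ∨ (ensamblarLoop s2 s1 r).1 ∈ r := by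
  induction r with
  | nil => left; rfl
  | cons i rest ih =>
    rw [ensamblarLoop]
    split
    · right; simp
    · rcases ih with h | h
      · left; exact h
      · right; simp [h]

-- descending range split at a middle point
lemma pyRange_neg_split (a b c : Int) (h1 : c ≤ b) (h2 : b ≤ a) :
    PySem.List.pyRange a c (-1) = PySem.List.pyRange a b (-1) ++ PySem.List.pyRange b c (-1) := by
  rw [PySem.List.pyRange_neg_one_eq_reverse, PySem.List.pyRange_neg_one_eq_reverse a b,
    PySem.List.pyRange_neg_one_eq_reverse b c,
    PySem.List.pyRange_one_append (c+1) (b+1) (a+1) (by omega) (by omega), List.reverse_append]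

-- everything B's maximum needs about foldl max on Nat
lemma foldl_max_zero_mem (t : List Nat) : t.foldl max 0 = 0 ∨ t.foldl max 0 ∈ t :=
  PySem.List.foldl_max_mem t 0

lemma le_foldl_max_zero (t : List Nat) : ∀ y ∈ t, y ≤ t.foldl max 0 :=
  (PySem.List.le_foldl_max t 0).2

-- the matched slice s2[:i] for an index i of A's range, as a take
lemma endswith_slice_iff (s2 s1 : List Char) (i : Int) (h : 0 ≤ i) :
    PySem.Chars.endswith s1 (PySem.List.slice s2 none (some i)) = true ↔ s2.take i.toNat <:+ s1 := by
  rw [PySem.List.slice_to s2 h]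
  exact PySem.Chars.endswith_iff s1 (s2.take i.toNat)

-- ===== VERDICT (by name: the statement is the Claim_ definition above) =====
theorem ensamblar_spec : Claim_unchanged_ensamblar := by
  intro seq1 seq2 _ hD
  rw [D_ensamblar] at hD
  push Not at hD
  obtain ⟨hDa, hDb⟩ := hD
  simp only [ensamblar, ensamblar_alt, PySem.List.len_eq]
  set s1 := seq1.toList with hs1
  set s2 := seq2.toList with hs2
  set act := s1.foldl (ensamblarStep s2) [] with hact
  set k := act.foldl max 0 with hk
  -- any matching index of A's range is at most B's maximum k
  have hmatch_le : ∀ i : Int, 0 < i → i ≤ (s1.length : Int) - 1 →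
      PySem.Chars.endswith s1 (PySem.List.slice s2 none (some i)) = true → i.toNat ≤ k := by
    intro i hi0 hile hm
    rw [endswith_slice_iff s2 s1 i (by omega)] at hm
    by_cases hcase : i.toNat ≤ s2.length
    · exact le_foldl_max_zero act _ ((active_mem s2 s1 i.toNat).mpr ⟨by omega, hcase, hm⟩)
    · rw [List.take_of_length_le (by omega)] at hm
      exact absurd hm (hDa (by omega))
  by_cases hk0 : k = 0
  · have hA : ensamblarLoop s2 s1 (PySem.List.pyRange ((s1.length : Int) - 1) 0 (-1)) = (0, s1) := by
      apply loop_skip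
      intro i hi
      rw [PySem.List.mem_pyRange_neg_one] at hi
      by_contra hcon
      rw [Bool.not_eq_false] at hcon
      have := hmatch_le i hi.1 hi.2 hcon
      omega
    rw [hA]
    simp [hk0, String.ofList_toList, hs1]
  · have hk_mem : k ∈ act := (foldl_max_zero_mem act).resolve_left hk0
    obtain ⟨hk1, hk2, hk3⟩ := (active_mem s2 s1 k).mp hk_mem
    have hkn1 : k ≤ s1.length := by
      have := hk3.length_le
      rw [List.length_take] at this
      omega
    have hklt : k < s1.length := by
      rcases Nat.lt_or_ge k s1.length with h | h
      · exact h
      · exfalso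
        have hkeq : k = s1.length := by omega
        have hteq : s2.take k = s1 := hk3.eq_of_length (by rw [List.length_take]; omega)
        have hpre2 : s1 <+: s2 := by
          rw [← hteq, hkeq]
          exact List.take_prefix s1.length s2
        have hnil := hDb (by omega) hpre2
        rw [hnil] at hkeq
        simp at hkeq
        omega
    have hsplit : PySem.List.pyRange ((s1.length : Int) - 1) 0 (-1) =
        PySem.List.pyRange ((s1.length : Int) - 1) (k : Int) (-1) ++ (k : Int) :: PySem.List.pyRange ((k : Int) - 1) 0 (-1) := by
      rw [pyRange_neg_split ((s1.length : Int) - 1) (k : Int) 0 (by omega) (by omega),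
          PySem.List.pyRange_neg_one_cons (by omega : (0 : Int) < (k : Int))]
    have hA : ensamblarLoop s2 s1 (PySem.List.pyRange ((s1.length : Int) - 1) 0 (-1)) =
        ((k : Int), s1 ++ PySem.List.slice s2 (some (k : Int)) none) := by
      rw [hsplit]
      apply loop_hit
      · intro j hj
        rw [PySem.List.mem_pyRange_neg_one] at hj
        by_contra hcon
        rw [Bool.not_eq_false] at hcon
        have := hmatch_le j (by omega) hj.2 hcon
        omega
      · rw [endswith_slice_iff s2 s1 (k : Int) (by omega)]
        simpa using hk3
    rw [hA]
    simp [hk0, PySem.List.slice_from_natCast]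

theorem ensamblar_changed : Claim_changed_ensamblar := by
  unfold Claim_changed_ensamblar; decide

theorem ensamblar_tight : Claim_exact_ensamblar := by
  intro seq1 seq2 _ hD heq
  have hfst := congrArg Prod.fst heq
  simp only [ensamblar, ensamblar_alt, PySem.List.len_eq] at hfst
  rw [D_ensamblar] at hD
  set s1 := seq1.toList with hs1
  set s2 := seq2.toList with hs2
  set act := s1.foldl (ensamblarStep s2) [] with hact
  set k := act.foldl max 0 with hk
  have hkle : ∀ l ∈ act, l ≤ s2.length ∧ l ≤ s1.length := by
    intro l hl
    obtain ⟨h1, h2, h3⟩ := (active_mem s2 s1 l).mp hl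
    have := h3.length_le
    rw [List.length_take] at this
    exact ⟨h2, by omega⟩
  rcases hD with ⟨hlen, hsuf⟩ | ⟨hlen, hpre, hne⟩
  · -- seq1 ends with all of seq2, more than one char longer: A reports n1-1, B at most n2
    have hcons : PySem.List.pyRange ((s1.length : Int) - 1) 0 (-1) =
        ((s1.length : Int) - 1) :: PySem.List.pyRange ((s1.length : Int) - 1 - 1) 0 (-1) :=
      PySem.List.pyRange_neg_one_cons (by omega)
    rw [hcons, ensamblarLoop] at hfst
    have hends : PySem.Chars.endswith s1 (PySem.List.slice s2 none (some ((s1.length : Int) - 1))) = true := by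
      rw [endswith_slice_iff s2 s1 _ (by omega), List.take_of_length_le (by omega)]
      exact hsuf
    rw [hends] at hfst
    simp only [if_true] at hfst
    -- B's side: k ≤ n2 < n1 - 1
    have hkb : k ≤ s2.length := by
      rcases foldl_max_zero_mem act with h | h
      · omega
      · exact (hkle k h).1
    by_cases hk0 : k = 0 <;> simp [hk0] at hfst <;> omega
  · -- seq1 is a prefix of seq2: B reports the full length n1, A at most n1-1
    have hn1 : 1 ≤ s1.length := by
      cases hs : s1 with
      | nil => exact absurd hs hne
      | cons a t => simp
    have hmem1 : s1.length ∈ act := by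
      apply (active_mem s2 s1 s1.length).mpr
      refine ⟨hn1, hlen, ?_⟩
      rw [← List.prefix_iff_eq_take.mp hpre]
    have hkge : s1.length ≤ k := le_foldl_max_zero act _ hmem1
    have hkeq : k = s1.length := by
      have : k ∈ act := (foldl_max_zero_mem act).resolve_left (by omega)
      have := (hkle k this).2
      omega
    have hloop := loop_fst s2 s1 (PySem.List.pyRange ((s1.length : Int) - 1) 0 (-1))
    have hAfst : (ensamblarLoop s2 s1 (PySem.List.pyRange ((s1.length : Int) - 1) 0 (-1))).1 < (s1.length : Int) := by
      rcases hloop with h | h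
      · omega
      · rw [PySem.List.mem_pyRange_neg_one] at h
        omega
    by_cases hk0 : k = 0 <;> simp [hk0] at hfst <;> omega
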